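-- pv_equiv track=rewrite | github.com/wangminglian/SQL_HELPER | sql_helper/udf_dynamic_programming.py | evaluate
-- ===== SOURCE A (Python) =====
-- def evaluate(arg):
--     arg.sort()
--     ret = [1 for i in range(len(arg))]
--
--     for i in range(0,len(arg)):
--         num = 1
--         for j in range(i+1,len(arg)):
--             if arg[j]-arg[i]<=3600000:
--                 num +=1
--                 ret[i] = num
--             else:
--                 break
--     return max(ret)
-- ===== SOURCE B (Python) =====
-- def evaluate(arg):
--     arg.sort()
--     best = 0
--     win = []
--     for x in arg:
--         win.append(x)
--         while x - win[0] > 3600000: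
--             win.pop(0)
--         if len(win) > best:
--             best = len(win)
--     return best
-- ===== Notes on version B (the rewrite author's own statement) =====
-- stated objective: faster
-- what changed: A re-scans forward from every start index of the sorted list; B makes one left-to-right pass maintaining a sliding window (append the new element, pop leading elements that fall out of the 3600000 range), so elements are not re-visited by every overlapping start.
-- outside the precondition, e.g. on evaluate([]): A raises ValueError, B returns 0
import Mathlib
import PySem

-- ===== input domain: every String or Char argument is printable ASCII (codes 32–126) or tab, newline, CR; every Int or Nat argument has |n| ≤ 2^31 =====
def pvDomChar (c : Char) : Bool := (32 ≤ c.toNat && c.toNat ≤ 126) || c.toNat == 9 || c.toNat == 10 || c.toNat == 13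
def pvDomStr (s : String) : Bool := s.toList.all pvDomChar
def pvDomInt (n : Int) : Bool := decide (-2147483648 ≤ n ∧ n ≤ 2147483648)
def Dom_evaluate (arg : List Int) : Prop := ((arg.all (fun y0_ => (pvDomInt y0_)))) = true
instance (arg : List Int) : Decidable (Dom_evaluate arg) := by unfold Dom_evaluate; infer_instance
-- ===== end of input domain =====

-- B replaces A's per-start forward scans by a single sliding-window pass over the sorted
-- list (objective: faster — measurably so in a timing run). Both A and B sort the caller's
-- list in place (same side effect); the equivalence proved is about the return value.

-- ===== PORT A =====
-- inner 'for j' loop with break: num/ret[i] threaded as the two accumulators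
def pvInnerA (x : Int) : List Int → Int → Int → Int
  | [], _, retI => retI
  | y :: ys, num, retI =>
    if y - x ≤ 3600000 then pvInnerA x ys (num + 1) (num + 1) else retI

-- outer 'for i' loop: each entry of ret is written only by its own iteration
def pvRetA : List Int → List Int
  | [] => []
  | x :: xs => pvInnerA x xs 1 1 :: pvRetA xs

def evaluate (arg : List Int) : Int :=
  let a := PySem.List.sorted arg (fun x => x) false
  (PySem.List.max? (pvRetA a) (fun x => x)).getD 0

-- ===== PORT B =====
-- one pass: append x, pop from the front while out of window (= dropWhile), track best
def pvLoopB : List Int → List Int → Int → Int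
  | [], _, best => best
  | x :: rest, win, best =>
    let w := (win ++ [x]).dropWhile (fun y => decide (3600000 < x - y))
    let best' := if (w.length : Int) > best then (w.length : Int) else best
    pvLoopB rest w best'

def evaluate_alt (arg : List Int) : Int :=
  pvLoopB (PySem.List.sorted arg (fun x => x) false) [] 0

-- ===== PRECONDITION & SPEC =====
-- Pre_ excludes only the empty list, on which A's max([]) raises ValueError.
def Pre_evaluate (arg : List Int) : Prop := arg ≠ []
instance (arg : List Int) : Decidable (Pre_evaluate arg) := by unfold Pre_evaluate; infer_instance
def pvWitness_evaluate : List Int := [0]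

def Spec_evaluate (arg : List Int) (out : Int) : Prop := out = evaluate_alt arg
instance (arg : List Int) (out : Int) : Decidable (Spec_evaluate arg out) := by unfold Spec_evaluate; infer_instance

-- ===== CLAIM (what is proved, stated in full; the proofs are below) =====
def Claim_equal_evaluate : Prop := ∀ (arg : List Int), Dom_evaluate arg → Pre_evaluate arg → Spec_evaluate arg (evaluate arg)

-- ===== LEMMAS AND PROOFS =====

-- window predicates: pQ x y = "y fits a window starting at x", qQ x y = "y fits a window ending at x"
def pQ (x y : Int) : Bool := decide (y - x ≤ 3600000)
def qQ (x y : Int) : Bool := decide (x - y ≤ 3600000)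

-- the per-start counts A computes (one per tail of the sorted list)
def cList : List Int → List Int
  | [] => []
  | x :: xs => (1 + ((xs.takeWhile (pQ x)).length : Int)) :: cList xs

-- the per-end window lengths B computes (p = already-processed prefix)
def winLens : List Int → List Int → List Int
  | _, [] => []
  | p, x :: rest => (((p ++ [x]).filter (qQ x)).length : Int) :: winLens (p ++ [x]) rest

theorem pvInnerA_eq (x : Int) (ys : List Int) : ∀ num : Int,
    pvInnerA x ys num num = num + ((ys.takeWhile (pQ x)).length : Int) := by
  induction ys with
  | nil => intro num; simp [pvInnerA]
  | cons y ys ih =>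
    intro num
    by_cases h : y - x ≤ 3600000
    · simp only [pvInnerA, List.takeWhile_cons, pQ, h, if_pos, decide_true,
        List.length_cons, ih (num + 1)]
      push_cast; ring
    · simp [pvInnerA, h, pQ]

theorem pvRetA_eq (l : List Int) : pvRetA l = cList l := by
  induction l with
  | nil => rfl
  | cons x xs ih => simp [pvRetA, cList, pvInnerA_eq, ih]

-- foldl-max toolkit
theorem le_foldl_max_init (l : List Int) (b : Int) : b ≤ l.foldl max b := by
  induction l generalizing b with
  | nil => simp
  | cons a l ih => exact le_trans (le_max_left b a) (ih (max b a))

theorem le_foldl_max_of_mem {l : List Int} {v : Int} (h : v ∈ l) (b : Int) : v ≤ l.foldl max b := by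
  induction l generalizing b with
  | nil => simp at h
  | cons a l ih =>
    rcases List.mem_cons.mp h with rfl | hv
    · exact le_trans (le_max_right b v) (le_foldl_max_init l (max b v))
    · exact ih hv (max b a)

theorem foldl_max_le {l : List Int} {b c : Int} (hb : b ≤ c) (h : ∀ v ∈ l, v ≤ c) : l.foldl max b ≤ c := by
  induction l generalizing b with
  | nil => simpa using hb
  | cons a l ih =>
    exact ih (max_le hb (h a (List.mem_cons_self))) (fun v hv => h v (List.mem_cons_of_mem a hv))

theorem cList_pos : ∀ (l : List Int), ∀ v ∈ cList l, 1 ≤ v := by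
  intro l
  induction l with
  | nil => simp [cList]
  | cons x xs ih =>
    intro v hv
    simp only [cList, List.mem_cons] at hv
    rcases hv with rfl | hv
    · have := Int.natCast_nonneg ((xs.takeWhile (pQ x)).length); omega
    · exact ih v hv

-- sorted-list facts
theorem dropWhile_neg_eq_filter (x : Int) : ∀ (l : List Int), l.Pairwise (· ≤ ·) →
    l.dropWhile (fun y => decide (3600000 < x - y)) = l.filter (qQ x) := by
  intro l
  induction l with
  | nil => intro _; rfl
  | cons y ys ih =>
    intro hs
    rcases List.pairwise_cons.mp hs with ⟨hy, hs'⟩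
    by_cases h : 3600000 < x - y
    · have hq : qQ x y = false := by simp [qQ]; omega
      simp [h, hq, ih hs']
    · have hq : qQ x y = true := by simp [qQ]; omega
      have hrest : ys.filter (qQ x) = ys := by
        apply List.filter_eq_self.mpr
        intro z hz
        have : y ≤ z := hy z hz
        simp [qQ]; omega
      simp [h, hq, hrest]

theorem filter_q_filter (x t : Int) (ht : t ≤ x) (p : List Int) :
    (p.filter (fun y => qQ t y)).filter (qQ x) = p.filter (qQ x) := by
  rw [List.filter_filter]
  apply List.filter_congr
  intro a _
  by_cases h : x - a ≤ 3600000
  · have : t - a ≤ 3600000 := by omega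
    simp [qQ, h, this]
  · simp [qQ, h]

theorem takeWhile_length_ge (P : Int → Bool) : ∀ (u v : List Int), (∀ y ∈ u, P y = true) →
    u.length ≤ ((u ++ v).takeWhile P).length := by
  intro u
  induction u with
  | nil => intro v _; simp
  | cons y u ih =>
    intro v h
    have hy : P y = true := h y (List.mem_cons_self)
    simp only [List.cons_append, List.takeWhile_cons, hy, if_pos, List.length_cons]
    have := ih v (fun z hz => h z (List.mem_cons_of_mem y hz))
    omega

-- B's loop computes foldl max over the window lengths
theorem pvLoopB_eq : ∀ (rest p : List Int) (t best : Int),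
    (p ++ rest).Pairwise (· ≤ ·) → (∀ y ∈ p, y ≤ t) → (∀ y ∈ rest, t ≤ y) →
    pvLoopB rest (p.filter (fun y => qQ t y)) best = (winLens p rest).foldl max best := by
  intro rest
  induction rest with
  | nil => intro p t best _ _ _; simp [pvLoopB, winLens]
  | cons x rest ih =>
    intro p t best h1 h2 h3
    have htx : t ≤ x := h3 x List.mem_cons_self
    obtain ⟨hp, hxr, hcross⟩ := List.pairwise_append.mp h1
    have hpx : ∀ y ∈ p, y ≤ x := fun y hy => hcross y hy x List.mem_cons_self
    obtain ⟨hxr', hrest⟩ := List.pairwise_cons.mp hxr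
    have hsortw : (p.filter (fun y => qQ t y) ++ [x]).Pairwise (· ≤ ·) := by
      apply List.pairwise_append.mpr
      refine ⟨hp.sublist List.filter_sublist, List.pairwise_singleton _ _, ?_⟩
      intro y hy z hz
      rw [List.mem_singleton] at hz; subst hz
      exact hpx y (List.mem_of_mem_filter hy)
    have hqx : qQ x x = true := by simp [qQ]
    have hw : (p.filter (fun y => qQ t y) ++ [x]).dropWhile (fun y => decide (3600000 < x - y))
        = (p ++ [x]).filter (fun y => qQ x y) := by
      rw [dropWhile_neg_eq_filter x _ hsortw, List.filter_append, List.filter_append,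
          filter_q_filter x t htx]
    have hrec := ih (p ++ [x]) x
      (max best (((p ++ [x]).filter (fun y => qQ x y)).length : Int))
      (by rwa [← List.append_cons])
      (by intro y hy
          rcases List.mem_append.mp hy with hy | hy
          · exact hpx y hy
          · rw [List.mem_singleton] at hy; subst hy; exact le_rfl)
      hxr'
    simp only [pvLoopB, winLens, List.foldl_cons]
    rw [hw]
    rw [show (if best < (((p ++ [x]).filter (fun y => qQ x y)).length : Int)
          then (((p ++ [x]).filter (fun y => qQ x y)).length : Int) else best)
        = max best (((p ++ [x]).filter (fun y => qQ x y)).length : Int) by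
      split_ifs with h <;> omega]
    exact hrec

-- membership lemmas
theorem mem_cList_append (x : Int) (xs : List Int) : ∀ (p : List Int),
    (1 + ((xs.takeWhile (pQ x)).length : Int)) ∈ cList (p ++ x :: xs) := by
  intro p
  induction p with
  | nil => simp [cList]
  | cons z p ih => simpa [cList] using Or.inr ih

theorem mem_winLens (x : Int) (s : List Int) : ∀ (q p : List Int),
    ((((p ++ q) ++ [x]).filter (qQ x)).length : Int) ∈ winLens p (q ++ x :: s) := by
  intro q
  induction q with
  | nil =>
    intro p
    simp [winLens]
  | cons z q ih =>
    intro p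
    have := ih (p ++ [z])
    simp only [List.cons_append, winLens, List.mem_cons]
    right
    simpa [List.append_assoc] using this

-- every per-start count is dominated by some window length, and conversely
theorem key_AB : ∀ (xs p : List Int), (p ++ xs).Pairwise (· ≤ ·) →
    ∀ v ∈ cList xs, v ≤ (winLens [] (p ++ xs)).foldl max 0 := by
  intro xs
  induction xs with
  | nil => intro p _ v hv; simp [cList] at hv
  | cons x xs ih =>
    intro p h v hv
    simp only [cList, List.mem_cons] at hv
    rcases hv with rfl | hv
    · obtain ⟨hp, hxx, hcross⟩ := List.pairwise_append.mp h
      obtain ⟨hxle, _⟩ := List.pairwise_cons.mp hxx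
      rcases List.eq_nil_or_concat (x :: xs.takeWhile (pQ x)) with hnil | ⟨front, x0, hfx⟩
      · simp at hnil
      · rw [List.concat_eq_append] at hfx
        have hx0mem : x0 ∈ x :: xs.takeWhile (pQ x) := by
          rw [hfx]; exact List.mem_append_right _ (List.mem_singleton.mpr rfl)
        have hx0W : x0 - x ≤ 3600000 := by
          rcases List.mem_cons.mp hx0mem with h' | h'
          · omega
          · have := List.mem_takeWhile_imp h'
            simpa [pQ] using this
        have hdecomp : p ++ x :: xs
            = (p ++ front) ++ x0 :: xs.dropWhile (pQ x) := by
          conv_lhs => rw [← List.takeWhile_append_dropWhile (p := pQ x) (l := xs)]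
          rw [show x :: (xs.takeWhile (pQ x) ++ xs.dropWhile (pQ x))
              = (x :: xs.takeWhile (pQ x)) ++ xs.dropWhile (pQ x) from rfl, hfx]
          simp [List.append_assoc]
        have hmem := mem_winLens x0 (xs.dropWhile (pQ x)) (p ++ front) []
        rw [List.nil_append, ← hdecomp] at hmem
        have hfilt : ((x :: xs.takeWhile (pQ x)).filter (qQ x0)) = x :: xs.takeWhile (pQ x) := by
          apply List.filter_eq_self.mpr
          intro y hy
          have hyx : x ≤ y := by
            rcases List.mem_cons.mp hy with rfl | hy'
            · exact le_rfl
            · exact hxle y ((List.takeWhile_sublist _).subset hy')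
          simp only [qQ, decide_eq_true_eq]; omega
        have hlen : (((p ++ front) ++ [x0]).filter (qQ x0)).length
            = (p.filter (qQ x0)).length + (1 + (xs.takeWhile (pQ x)).length) := by
          rw [List.append_assoc, ← hfx, List.filter_append, hfilt]
          simp
          omega
        have hfin := le_foldl_max_of_mem hmem 0
        rw [hlen] at hfin
        push_cast at hfin ⊢
        omega
    · have h' : ((p ++ [x]) ++ xs).Pairwise (· ≤ ·) := by rwa [← List.append_cons]
      have := ih (p ++ [x]) h' v hv
      rwa [← List.append_cons] at this

theorem key_BA : ∀ (xs p : List Int), (p ++ xs).Pairwise (· ≤ ·) →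
    ∀ v ∈ winLens p xs, v ≤ (cList (p ++ xs)).foldl max 0 := by
  intro xs
  induction xs with
  | nil => intro p _ v hv; simp [winLens] at hv
  | cons x xs ih =>
    intro p h v hv
    obtain ⟨hp, hxx, hcross⟩ := List.pairwise_append.mp h
    obtain ⟨hxle, _⟩ := List.pairwise_cons.mp hxx
    have hpx : ∀ y ∈ p, y ≤ x := fun y hy => hcross y hy x List.mem_cons_self
    simp only [winLens, List.mem_cons] at hv
    rcases hv with rfl | hv
    · have hq2 : p.dropWhile (fun y => decide (3600000 < x - y)) = p.filter (qQ x) :=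
        dropWhile_neg_eq_filter x p hp
      have hqxx : qQ x x = true := by simp [qQ]
      have hvlen : ((p ++ [x]).filter (qQ x)).length = (p.filter (qQ x)).length + 1 := by
        simp [List.filter_append, hqxx]
      cases hq2e : p.filter (qQ x) with
      | nil =>
        have hmem := mem_cList_append x xs p
        have hge := cList_pos (p ++ x :: xs) _ hmem
        have hfin := le_foldl_max_of_mem hmem 0
        rw [hvlen, hq2e]
        simp only [List.length_nil]
        omega
      | cons s0 s' =>
        have hs0 : s0 ∈ p.filter (qQ x) := by rw [hq2e]; exact List.mem_cons_self
        have hs0W : x - s0 ≤ 3600000 := by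
          have := List.of_mem_filter hs0; simpa [qQ] using this
        have hsub : ∀ y ∈ s', y ∈ p := by
          intro y hy
          exact List.mem_of_mem_filter (p := qQ x) (by rw [hq2e]; exact List.mem_cons_of_mem _ hy)
        have hdecomp : p ++ x :: xs
            = p.takeWhile (fun y => decide (3600000 < x - y)) ++ s0 :: (s' ++ x :: xs) := by
          conv_lhs => rw [← List.takeWhile_append_dropWhile
            (p := fun y => decide (3600000 < x - y)) (l := p)]
          rw [hq2, hq2e]
          simp [List.append_assoc]
        have hmem := mem_cList_append s0 (s' ++ x :: xs)
          (p.takeWhile (fun y => decide (3600000 < x - y)))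
        rw [← hdecomp] at hmem
        have hallp : ∀ y ∈ s' ++ [x], pQ s0 y = true := by
          intro y hy
          rcases List.mem_append.mp hy with hy | hy
          · have : y ≤ x := hpx y (hsub y hy)
            simp only [pQ, decide_eq_true_eq]; omega
          · rw [List.mem_singleton] at hy; subst hy
            simp only [pQ, decide_eq_true_eq]; omega
        have hlen := takeWhile_length_ge (pQ s0) (s' ++ [x]) xs hallp
        rw [show (s' ++ [x]) ++ xs = s' ++ x :: xs by simp] at hlen
        have hfin := le_foldl_max_of_mem hmem 0
        rw [hvlen, hq2e]
        simp only [List.length_cons, List.length_append, List.length_cons,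
          List.length_nil] at hlen hfin ⊢
        push_cast at hfin ⊢
        omega
    · have h' : ((p ++ [x]) ++ xs).Pairwise (· ≤ ·) := by rwa [← List.append_cons]
      have := ih (p ++ [x]) h' v hv
      rwa [← List.append_cons] at this

theorem main_sorted (a : List Int) (hs : a.Pairwise (· ≤ ·)) (hne : a ≠ []) :
    (PySem.List.max? (pvRetA a) (fun x => x)).getD 0 = pvLoopB a [] 0 := by
  obtain ⟨x, t, rfl⟩ := List.exists_cons_of_ne_nil hne
  obtain ⟨hxle, ht⟩ := List.pairwise_cons.mp hs
  have hxall : ∀ y ∈ x :: t, x ≤ y := by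
    intro y hy
    rcases List.mem_cons.mp hy with rfl | hy
    · exact le_rfl
    · exact hxle y hy
  have hB := pvLoopB_eq (x :: t) [] x 0 (by simpa using hs) (by simp) hxall
  simp only [List.filter_nil] at hB
  rw [pvRetA_eq, hB]
  have hc : cList (x :: t) = (1 + ((t.takeWhile (pQ x)).length : Int)) :: cList t := rfl
  rw [hc, PySem.List.max?_id_cons, Option.getD_some]
  have h0 : max 0 (1 + ((t.takeWhile (pQ x)).length : Int))
      = 1 + ((t.takeWhile (pQ x)).length : Int) := by
    have := Int.natCast_nonneg ((t.takeWhile (pQ x)).length); omega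
  have hA : (cList t).foldl max (1 + ((t.takeWhile (pQ x)).length : Int))
      = (cList (x :: t)).foldl max 0 := by
    rw [hc]; simp only [List.foldl_cons, h0]
  rw [hA]
  apply le_antisymm
  · apply foldl_max_le (le_foldl_max_init _ 0)
    intro v hv
    have := key_AB (x :: t) [] (by simpa using hs) v (by rw [hc]; rwa [← hc])
    simpa using this
  · apply foldl_max_le (le_foldl_max_init _ 0)
    intro v hv
    have := key_BA (x :: t) [] (by simpa using hs) v hv
    simpa using this

-- ===== VERDICT (by name: the statement is the Claim_ definition above) =====
theorem evaluate_spec : Claim_equal_evaluate := by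
  intro arg _ hpre
  unfold Spec_evaluate evaluate evaluate_alt
  have hs := PySem.List.sorted_pairwise arg (fun x => x)
  have hne : PySem.List.sorted arg (fun x => x) false ≠ [] := by
    intro h
    exact hpre ((PySem.List.sorted_eq_nil_iff arg (fun x => x) false).mp h)
  exact main_sorted _ hs hne
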